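-- pv_equiv track=rewrite | github.com/Shiv1202/DataStructure_and_Algorithms_Python_and_cpp | codevita.py | solution
-- ===== SOURCE A (Python) =====
-- import itertools
--
-- def solution(start, end, k):
--   a = [i for i in range(start, end + 1)]
--   ans = 0
--   x = itertools.product(a, repeat = k)
--   for group in x:
--     if sum(group) % 2 == 0:
--       ans = ans + 1
--   return ans % 100000007
-- ===== SOURCE B (Python) =====
-- # B: closed form -- among n^k tuples, even-sum count is (n^k + d^k)/2 where
-- # d = (#even) - (#odd); computed with 3-argument pow and the inverse of 2 mod M.
-- def solution(start, end, k):
--     M = 100000007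
--     n = end - start + 1
--     if n < 0:
--         n = 0
--     e = end // 2 - (start - 1) // 2 if n > 0 else 0
--     d = 2 * e - n
--     return (pow(n, k, M) + pow(d, k, M)) * ((M + 1) // 2) % M
-- ===== Notes on version B (the rewrite author's own statement) =====
-- stated objective: faster
-- what changed: Replaces exhaustive enumeration of all n^k tuples with the closed form (n^k + d^k)/2 (d = even-count minus odd-count), evaluated with 3-argument pow and the modular inverse of 2; intended as faster (measured 2.19x at the largest size both finished, A times out beyond).
import Mathlib
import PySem

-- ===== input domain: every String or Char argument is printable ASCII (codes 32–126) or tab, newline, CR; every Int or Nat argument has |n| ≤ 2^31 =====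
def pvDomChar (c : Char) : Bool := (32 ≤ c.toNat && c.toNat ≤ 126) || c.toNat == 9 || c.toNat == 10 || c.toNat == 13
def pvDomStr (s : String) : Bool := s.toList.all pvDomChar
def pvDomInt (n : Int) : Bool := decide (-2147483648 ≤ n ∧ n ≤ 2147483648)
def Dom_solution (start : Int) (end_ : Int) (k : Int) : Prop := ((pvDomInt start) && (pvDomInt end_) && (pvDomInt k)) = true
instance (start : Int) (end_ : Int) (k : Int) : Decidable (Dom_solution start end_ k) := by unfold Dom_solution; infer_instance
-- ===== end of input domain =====

-- B replaces A's enumeration of all n^k tuples by the closed form (n^k + d^k)/2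
-- (d = even-count minus odd-count of the range), computed mod 100000007; intended
-- as faster (A times out already at small sizes where B returns; measured 2.19x
-- at the largest size both finished).

-- ===== PORT A =====
-- itertools.product(a, repeat=k): all k-tuples, first coordinate varying slowest
def prodRepeatA (a : List Int) : Nat → List (List Int)
  | 0 => [[]]
  | j + 1 => a.flatMap (fun x => (prodRepeatA a j).map (fun g => x :: g))

def solution (start : Int) (end_ : Int) (k : Int) : Int :=
  let a := PySem.List.pyRange start (end_ + 1) 1
  let x := prodRepeatA a k.toNat   -- k ≥ 0 by Pre_: product(..., repeat=k) raises ValueError for k < 0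
  let ans := x.foldl (fun ans g => if PySem.Int.mod g.sum 2 = 0 then ans + 1 else ans) (0 : Int)
  PySem.Int.mod ans 100000007

-- ===== PORT B =====
def solution_alt (start : Int) (end_ : Int) (k : Int) : Int :=
  let M : Int := 100000007
  let n0 := end_ - start + 1
  let n := if n0 < 0 then 0 else n0
  let e := if n > 0 then PySem.Int.floordiv end_ 2 - PySem.Int.floordiv (start - 1) 2 else 0
  let d := 2 * e - n
  -- pow(n, k, M): k ≥ 0 by Pre_ (Python pow would try a modular inverse for k < 0)
  PySem.Int.mod ((PySem.Int.powMod n k.toNat M + PySem.Int.powMod d k.toNat M)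
      * PySem.Int.floordiv (M + 1) 2) M

-- ===== PRECONDITION & SPEC =====
-- Pre_ excludes k < 0, where A raises ValueError ("repeat argument cannot be negative").
def Pre_solution (start : Int) (end_ : Int) (k : Int) : Prop := 0 ≤ k
instance (start : Int) (end_ : Int) (k : Int) : Decidable (Pre_solution start end_ k) := by unfold Pre_solution; infer_instance
def pvWitness_solution : Int × Int × Int := (1, 3, 2)

def Spec_solution (start : Int) (end_ : Int) (k : Int) (out : Int) : Prop := out = solution_alt start end_ k
instance (start : Int) (end_ : Int) (k : Int) (out : Int) : Decidable (Spec_solution start end_ k out) := by unfold Spec_solution; infer_instance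

-- ===== CLAIM (what is proved, stated in full; the proofs are below) =====
def Claim_equal_solution : Prop := ∀ (start : Int) (end_ : Int) (k : Int), Dom_solution start end_ k → Pre_solution start end_ k → Spec_solution start end_ k (solution start end_ k)

-- ===== LEMMAS AND PROOFS =====

-- parity of an integer as a Bool ('sum % 2 == 0')
def parEven (z : Int) : Bool := decide (PySem.Int.mod z 2 = 0)

-- count of k-tuples whose sum-parity flag equals b
def cnt (a : List Int) (j : Nat) (b : Bool) : Nat :=
  (prodRepeatA a j).countP (fun g => parEven g.sum == b)

lemma parEven_add (x s : Int) : parEven (x + s) = (parEven x == parEven s) := by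
  simp only [parEven, PySem.Int.mod_eq_emod_of_pos (by norm_num : (0:Int) < 2)]
  by_cases hx : x % 2 = 0 <;> by_cases hs : s % 2 = 0 <;>
    simp [hx, hs] <;> omega

lemma countP_map_cons (P : List (List Int)) (x : Int) (b : Bool) :
    (P.map (fun g => x :: g)).countP (fun g => parEven g.sum == b)
      = P.countP (fun g => parEven g.sum == (parEven x == b)) := by
  rw [List.countP_map]
  apply List.countP_congr
  intro g _
  simp only [Function.comp, List.sum_cons, parEven_add]
  cases hx : parEven x <;> cases hs : parEven g.sum <;> cases b <;> simp

lemma countP_flat (a : List Int) (P : List (List Int)) (b : Bool) :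
    (a.flatMap (fun x => P.map (fun g => x :: g))).countP (fun g => parEven g.sum == b)
      = a.countP parEven * P.countP (fun g => parEven g.sum == b)
        + a.countP (fun x => ! parEven x) * P.countP (fun g => parEven g.sum == !b) := by
  induction a with
  | nil => simp
  | cons x a ih =>
    simp only [List.flatMap_cons, List.countP_append, List.countP_cons, ih, countP_map_cons]
    cases hx : parEven x <;> cases b <;> simp [hx] <;> ring

lemma cnt_succ (a : List Int) (j : Nat) (b : Bool) :
    cnt a (j + 1) b = a.countP parEven * cnt a j b + a.countP (fun x => ! parEven x) * cnt a j (!b) := by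
  simp only [cnt, prodRepeatA, countP_flat]

lemma countP_not_eq (l : List Int) (p : Int → Bool) :
    l.countP (fun x => ! p x) = l.length - l.countP p := by
  induction l with
  | nil => simp
  | cons x l ih =>
    have := l.countP_le_length (p := p)
    cases hx : p x <;> simp [List.countP_cons, hx, ih] <;> omega

-- the two tuple counts have closed-form sum and difference
lemma cnt_sum_diff (a : List Int) (j : Nat) :
    (cnt a j true : Int) + (cnt a j false : Int) = ((a.length : Int)) ^ j
    ∧ (cnt a j true : Int) - (cnt a j false : Int)
        = ((a.countP parEven : Int) - (a.countP (fun x => ! parEven x) : Int)) ^ j := by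
  induction j with
  | zero =>
    simp [cnt, prodRepeatA, List.countP, List.countP.go, parEven]
  | succ j ih =>
    obtain ⟨ihs, ihd⟩ := ih
    have hlen : (a.length : Int) = (a.countP parEven : Int) + (a.countP (fun x => ! parEven x) : Int) := by
      have h1 : a.countP parEven ≤ a.length := List.countP_le_length
      rw [countP_not_eq]
      push_cast [Nat.cast_sub h1]
      ring
    constructor
    · push_cast [cnt_succ, Bool.not_true, Bool.not_false]
      rw [pow_succ]
      nlinarith [ihs, hlen]
    · push_cast [cnt_succ, Bool.not_true, Bool.not_false]
      rw [pow_succ]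
      nlinarith [ihd, hlen]

lemma powMod_eq (b m : Int) (e : Nat) (hm : 0 < m) : PySem.Int.powMod b e m = (b ^ e) % m := by
  simp only [PySem.Int.powMod, PySem.Int.mod_eq_emod_of_pos hm]

-- even-element count of range(s, s+m)
lemma countP_parEven_pyRange (m : Nat) : ∀ s : Int,
    ((PySem.List.pyRange s (s + m) 1).countP parEven : Int) = (s + m - 1) / 2 - (s - 1) / 2 := by
  induction m with
  | zero =>
    intro s
    rw [PySem.List.pyRange_one_eq_nil (by omega)]
    simp
  | succ m ih =>
    intro s
    rw [PySem.List.pyRange_one_cons (by push_cast; omega)]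
    have h2 : s + 1 + (m : Int) = s + ((m : Nat) + 1 : Nat) := by push_cast; ring
    have := ih (s + 1)
    rw [h2] at this
    rw [List.countP_cons, Nat.cast_add, this]
    simp only [parEven, PySem.Int.mod_eq_emod_of_pos (by norm_num : (0:Int) < 2)]
    by_cases hs : s % 2 = 0 <;> simp [hs] <;> push_cast <;> omega

-- ===== VERDICT (by name: the statement is the Claim_ definition above) =====
theorem solution_spec : Claim_equal_solution := by
  intro start end_ k _hDom hk
  unfold Spec_solution solution solution_alt
  simp only []
  set a := PySem.List.pyRange start (end_ + 1) 1 with ha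
  set M : Int := 100000007 with hMdef
  have hM : (0:Int) < M := by norm_num
  -- A's foldl counts even-sum tuples
  rw [PySem.List.foldl_ite_add_one (fun g : List Int => PySem.Int.mod g.sum 2 = 0) (prodRepeatA a k.toNat) 0]
  have hcntA : (prodRepeatA a k.toNat).countP (fun g => decide (PySem.Int.mod g.sum 2 = 0))
      = cnt a k.toNat true := by
    unfold cnt
    apply List.countP_congr
    intro g _
    simp [parEven]
  -- B's computed n, e, d are length, even count, and even-minus-odd count of a
  set n0 := end_ - start + 1 with hn0
  set n := if n0 < 0 then 0 else n0 with hn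
  set e := if n > 0 then PySem.Int.floordiv end_ 2 - PySem.Int.floordiv (start - 1) 2 else 0 with he
  have hlen : (a.length : Int) = n := by
    rw [ha, PySem.List.length_pyRange_one]
    rw [hn, hn0]
    omega
  have heval : e = (a.countP parEven : Int) := by
    by_cases hc : n > 0
    · have hm : end_ + 1 = start + ((end_ + 1 - start).toNat : Int) := by omega
      have := countP_parEven_pyRange (end_ + 1 - start).toNat start
      rw [← hm] at this
      rw [he, if_pos hc, this,
        PySem.Int.floordiv_eq_ediv_of_pos (by norm_num : (0:Int) < 2),
        PySem.Int.floordiv_eq_ediv_of_pos (by norm_num : (0:Int) < 2)]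
      omega
    · have hnil : a = [] := by
        rw [ha]
        exact PySem.List.pyRange_one_eq_nil (by omega)
      rw [he, if_neg hc, hnil]
      simp
  have hdval : 2 * e - n = (a.countP parEven : Int) - (a.countP (fun x => ! parEven x) : Int) := by
    have h1 : a.countP parEven ≤ a.length := List.countP_le_length
    rw [countP_not_eq]
    push_cast [Nat.cast_sub h1]
    rw [← heval, ← hlen] at *
    omega
  -- the closed form
  obtain ⟨hsum, hdiff⟩ := cnt_sum_diff a k.toNat
  rw [hlen] at hsum
  rw [← hdval] at hdiff
  have h2E : 2 * (cnt a k.toNat true : Int) = n ^ k.toNat + (2 * e - n) ^ k.toNat := by omega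
  -- reduce both sides mod M
  rw [hcntA, powMod_eq _ _ _ hM, powMod_eq _ _ _ hM,
    PySem.Int.mod_eq_emod_of_pos hM, PySem.Int.mod_eq_emod_of_pos hM, hMdef]
  have hinv : PySem.Int.floordiv ((100000007:Int) + 1) 2 = 50000004 := by decide
  rw [hinv, zero_add]
  have ha1 : (n ^ k.toNat % 100000007) ≡ n ^ k.toNat [ZMOD 100000007] :=
    Int.emod_emod_of_dvd _ dvd_rfl
  have ha2 : ((2 * e - n) ^ k.toNat % 100000007) ≡ (2 * e - n) ^ k.toNat [ZMOD 100000007] :=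
    Int.emod_emod_of_dvd _ dvd_rfl
  have h1 : (n ^ k.toNat % 100000007 + (2 * e - n) ^ k.toNat % 100000007)
      ≡ n ^ k.toNat + (2 * e - n) ^ k.toNat [ZMOD 100000007] := ha1.add ha2
  have h2 : (n ^ k.toNat % 100000007 + (2 * e - n) ^ k.toNat % 100000007) * 50000004
      ≡ (cnt a k.toNat true : Int) [ZMOD 100000007] := by
    calc (n ^ k.toNat % 100000007 + (2 * e - n) ^ k.toNat % 100000007) * 50000004
        ≡ (n ^ k.toNat + (2 * e - n) ^ k.toNat) * 50000004 [ZMOD 100000007] := h1.mul_right _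
      _ = (cnt a k.toNat true : Int) + (cnt a k.toNat true : Int) * 100000007 := by
          rw [← h2E]; ring
      _ ≡ (cnt a k.toNat true : Int) [ZMOD 100000007] := by
          unfold Int.ModEq
          omega
  exact h2.symm
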